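-- pv_equiv track=rewrite | github.com/myangmi/CIS575 | hw06problem05.py | AlmostOrdered
-- ===== SOURCE A (Python) =====
-- def AlmostOrdered(n):
-- 	# initialize the array with no values
-- 	array = [None] * n
--
-- 	# initialize a counter.
-- 	i = 0
--
-- 	# loop from 0, 1, 2, ..., n and fill the arrays with almost ordered values.
-- 	while (i < n):
-- 		if i % 13 == 12:
-- 			array[i] = (i + 13) % n
-- 		else:
-- 			array[i] = i
-- 		i = i + 1
-- 	return array
-- ===== SOURCE B (Python) =====
-- def AlmostOrdered(n):
--     # build the output as a concatenation of 13-element chunks: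
--     # each full chunk is [start..start+12] with its last entry replaced by
--     # (start+25) % n; a trailing short chunk (length < 13) is left untouched.
--     result = []
--     start = 0
--     while start < n:
--         end = min(start + 13, n)
--         chunk = list(range(start, end))
--         if end == start + 13:
--             chunk[12] = (start + 25) % n
--         result.extend(chunk)
--         start = end
--     return result
-- ===== Notes on version B (the rewrite author's own statement) =====
-- stated objective: alternative
-- what changed: B builds the output by concatenating 13-element chunks (each a contiguous range with its last entry replaced by (start+25)%n), instead of A's per-element while-loop that tests i % 13 and writes into a preallocated array.
import Mathlib
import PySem

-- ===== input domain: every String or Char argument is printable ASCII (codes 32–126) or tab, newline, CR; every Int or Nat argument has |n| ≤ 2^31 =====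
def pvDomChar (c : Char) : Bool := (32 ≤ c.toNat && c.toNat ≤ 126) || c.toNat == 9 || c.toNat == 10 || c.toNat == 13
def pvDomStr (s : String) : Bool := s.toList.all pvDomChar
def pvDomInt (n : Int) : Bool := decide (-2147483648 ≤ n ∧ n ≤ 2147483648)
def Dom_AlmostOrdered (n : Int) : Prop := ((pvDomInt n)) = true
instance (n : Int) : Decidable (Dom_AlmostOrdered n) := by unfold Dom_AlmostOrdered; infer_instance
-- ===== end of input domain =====

-- B builds the output by concatenating 13-element chunks (each a contiguous
-- range with its last entry replaced) instead of A's per-element conditional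
-- while-loop over a preallocated array (alternative decomposition).

-- ===== PORT A =====
-- A's 'while i < n' loop; the Python array starts as [None]*n, modeled with
-- placeholder 0 (every index 0 ≤ i < n is overwritten before the loop ends).
def AlmostOrderedLoop (n i : Int) (array : List Int) : List Int :=
  if i < n then
    AlmostOrderedLoop n (i + 1)
      (array.set i.toNat
        (if PySem.Int.mod i 13 = 12 then PySem.Int.mod (i + 13) n else i))
  else array
termination_by (n - i).toNat
decreasing_by omega

def AlmostOrdered (n : Int) : List Int :=
  AlmostOrderedLoop n 0 (List.replicate n.toNat 0)

-- ===== PORT B =====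
-- B's 'while start < n' chunk loop: emit [start, end) with the last entry of a
-- full (13-long) chunk replaced by (start+25) % n, then continue from end.
def AlmostOrderedAltLoop (n start : Int) : List Int :=
  if start < n then
    let e := min (start + 13) n
    let chunk := PySem.List.pyRange start e 1
    let chunk :=
      if e = start + 13 then chunk.set 12 (PySem.Int.mod (start + 25) n)
      else chunk
    chunk ++ AlmostOrderedAltLoop n e
  else []
termination_by (n - start).toNat
decreasing_by omega

def AlmostOrdered_alt (n : Int) : List Int := AlmostOrderedAltLoop n 0

-- ===== PRECONDITION & SPEC =====
def Spec_AlmostOrdered (n : Int) (out : List Int) : Prop := out = AlmostOrdered_alt n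
instance (n : Int) (out : List Int) : Decidable (Spec_AlmostOrdered n out) := by unfold Spec_AlmostOrdered; infer_instance

-- ===== CLAIM (what is proved, stated in full; the proofs are below) =====
def Claim_equal_AlmostOrdered : Prop := ∀ (n : Int), Dom_AlmostOrdered n → Spec_AlmostOrdered n (AlmostOrdered n)

-- ===== LEMMAS AND PROOFS =====

-- the common target value: element j of the result is (j+13)%n when j%13 = 12, else j
def pvTarget (n : Int) : List Int :=
  (PySem.List.pyRange 0 n 1).map
    (fun j => if PySem.Int.mod j 13 = 12 then PySem.Int.mod (j + 13) n else j)

lemma pvA_loop (n : Int) (k : Nat) :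
    ∀ (i : Int), 0 ≤ i → (n - i).toNat = k → ∀ (array : List Int),
      array.length = n.toNat →
      AlmostOrderedLoop n i array =
        array.take i.toNat ++
          (PySem.List.pyRange i n 1).map
            (fun j => if PySem.Int.mod j 13 = 12 then PySem.Int.mod (j + 13) n else j) := by
  induction k with
  | zero =>
    intro i hi hk array hlen
    have hni : n ≤ i := by omega
    rw [AlmostOrderedLoop, if_neg (by omega), PySem.List.pyRange_one_eq_nil hni,
      List.map_nil, List.append_nil, List.take_of_length_le (by omega)]
  | succ k ih =>
    intro i hi hk array hlen
    have hiln : i < n := by omega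
    rw [AlmostOrderedLoop, if_pos hiln,
      ih (i + 1) (by omega) (by omega) _ (by simpa using hlen)]
    rw [PySem.List.pyRange_one_cons hiln, List.map_cons]
    have h1 : (i + 1).toNat = i.toNat + 1 := by omega
    have h2 : i.toNat < array.length := by omega
    rw [h1, List.take_add_one, List.take_set, List.getElem?_set_self (by simpa using h2),
      List.set_eq_of_length_le (by simp [List.length_take])]
    simp

lemma pvA_eq_target (n : Int) : AlmostOrdered n = pvTarget n := by
  rw [AlmostOrdered,
    pvA_loop n (n - 0).toNat 0 le_rfl rfl _ (by simp)]
  simp [pvTarget]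

-- one chunk of B equals the corresponding segment of the target map
lemma pvChunk_eq (n start : Int) (h0 : 0 ≤ start) (hmod : start % 13 = 0)
    (hsn : start < n) :
    (if min (start + 13) n = start + 13 then
        (PySem.List.pyRange start (min (start + 13) n) 1).set 12
          (PySem.Int.mod (start + 25) n)
      else PySem.List.pyRange start (min (start + 13) n) 1) =
      (PySem.List.pyRange start (min (start + 13) n) 1).map
        (fun j => if PySem.Int.mod j 13 = 12 then PySem.Int.mod (j + 13) n else j) := by
  set e := min (start + 13) n with he
  have hmod13 : ∀ j : Int, start ≤ j → j < start + 13 →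
      (PySem.Int.mod j 13 = 12 ↔ j = start + 12) := by
    intro j hj1 hj2
    rw [PySem.Int.mod_eq_emod_of_pos (by norm_num)]
    omega
  by_cases hfull : e = start + 13
  · rw [if_pos hfull]
    apply List.ext_getElem (by simp)
    intro k hk1 hk2
    have hlen : (PySem.List.pyRange start e 1).length = 13 := by
      rw [PySem.List.length_pyRange_one]; omega
    have hk : k < 13 := by
      rw [List.length_set, hlen] at hk1; exact hk1
    rw [List.getElem_set, List.getElem_map, PySem.List.getElem_pyRange_one]
    rcases eq_or_ne 12 k with he12 | hne
    · rw [if_pos he12]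
      have : PySem.Int.mod (start + (k : Int)) 13 = 12 := by
        rw [(hmod13 _ (by omega) (by omega))]; omega
      rw [if_pos this]
      congr 1; omega
    · rw [if_neg hne]
      have : ¬ PySem.Int.mod (start + (k : Int)) 13 = 12 := by
        rw [(hmod13 _ (by omega) (by omega))]; omega
      rw [if_neg this]
  · rw [if_neg hfull]
    conv_lhs => rw [← List.map_id (PySem.List.pyRange start e 1)]
    refine List.map_congr_left ?_
    intro j hj
    rw [PySem.List.mem_pyRange_one] at hj
    have : ¬ PySem.Int.mod j 13 = 12 := by
      rw [(hmod13 _ hj.1 (by omega))]; omega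
    simp only [id]
    rw [if_neg this]

lemma pvB_loop (n : Int) (k : Nat) :
    ∀ (start : Int), 0 ≤ start → (start % 13 = 0 ∨ n ≤ start) → (n - start).toNat = k →
      AlmostOrderedAltLoop n start =
        (PySem.List.pyRange start n 1).map
          (fun j => if PySem.Int.mod j 13 = 12 then PySem.Int.mod (j + 13) n else j) := by
  induction k using Nat.strong_induction_on with
  | _ k ih
  intro start h0 hmod hk
  rw [AlmostOrderedAltLoop]
  by_cases hsn : start < n
  · rw [if_pos hsn]
    simp only []
    have hm : start % 13 = 0 := by omega
    set e := min (start + 13) n with he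
    have h1 : start ≤ e := by omega
    have h2 : e ≤ n := by omega
    rw [pvChunk_eq n start h0 hm hsn,
      ih (n - e).toNat (by omega) e (by omega) (by omega) rfl,
      ← List.map_append, ← PySem.List.pyRange_one_append start e n h1 h2]
  · rw [if_neg hsn, PySem.List.pyRange_one_eq_nil (by omega), List.map_nil]

lemma pvB_eq_target (n : Int) : AlmostOrdered_alt n = pvTarget n := by
  rw [AlmostOrdered_alt, pvB_loop n (n - 0).toNat 0 le_rfl (Or.inl (by decide)) rfl, pvTarget]

-- ===== VERDICT (by name: the statement is the Claim_ definition above) =====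
theorem AlmostOrdered_spec : Claim_equal_AlmostOrdered := by
  intro n _
  unfold Spec_AlmostOrdered
  rw [pvA_eq_target, pvB_eq_target]
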